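-- pv_equiv track=rewrite | github.com/eunchae2000/algorithm_test | study/힙/더맵게.py | solution
-- ===== SOURCE A (Python) =====
-- import heapq
--
-- def solution(s, k):
--     heap = []
--     count = 0
--     # s의 원소들을 heapq를 사용하여 heap에 저장
--     for i in s:
--         heapq.heappush(heap, i)
--
--     while heap[0]<k:
--         # heap은 원소를 추가하거나 삭제하면 자동으로 정렬해주기 때문에 원소를 추가하고 정렬은 굳이 선언x
--         heapq.heappush(heap, heapq.heappop(heap) + heapq.heappop(heap)*2)
--         count += 1
--
--         # 예외
--         if len(heap) == 1 and heap[0] < k: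
--             return -1
--     return count
-- ===== SOURCE B (Python) =====
-- def _pop(orig, mixed, i, j):
--     # take the smaller front of the two queues; advance that front
--     if j >= len(mixed) or (i < len(orig) and orig[i] <= mixed[j]):
--         return orig[i], i + 1, j
--     return mixed[j], i, j + 1
--
--
-- def solution(s, k):
--     # Two-queue technique: sort once; originals are consumed left to right,
--     # every mixed value is appended to a second queue which stays sorted
--     # (each new mix a+2b satisfies a+2b >= every unconsumed earlier mix),
--     # so the global minimum is always one of the two fronts -- no heap needed.
--     orig = sorted(s)
--     mixed = []
--     i = j = 0  # front of orig / front of mixed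
--     count = 0
--     while True:
--         if i < len(orig) and (j >= len(mixed) or orig[i] <= mixed[j]):
--             cur = orig[i]
--         else:
--             cur = mixed[j]  # IndexError when both queues are empty
--         if cur >= k:
--             return count
--         a, i, j = _pop(orig, mixed, i, j)
--         b, i, j = _pop(orig, mixed, i, j)
--         m = a + b * 2
--         mixed.append(m)
--         count += 1
--         if (len(orig) - i) + (len(mixed) - j) == 1 and m < k:
--             return -1
-- ===== Notes on version B (the rewrite author's own statement) =====
-- stated objective: alternative
-- what changed: Replaced the heap by the two-queue merge technique: sort once, keep originals and newly mixed values in two separate queues consumed from the front, picking the smaller front each time; correctness rests on the proved invariant that successive unconsumed mixes are nondecreasing, so no priority structure is maintained at all.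
import Mathlib
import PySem

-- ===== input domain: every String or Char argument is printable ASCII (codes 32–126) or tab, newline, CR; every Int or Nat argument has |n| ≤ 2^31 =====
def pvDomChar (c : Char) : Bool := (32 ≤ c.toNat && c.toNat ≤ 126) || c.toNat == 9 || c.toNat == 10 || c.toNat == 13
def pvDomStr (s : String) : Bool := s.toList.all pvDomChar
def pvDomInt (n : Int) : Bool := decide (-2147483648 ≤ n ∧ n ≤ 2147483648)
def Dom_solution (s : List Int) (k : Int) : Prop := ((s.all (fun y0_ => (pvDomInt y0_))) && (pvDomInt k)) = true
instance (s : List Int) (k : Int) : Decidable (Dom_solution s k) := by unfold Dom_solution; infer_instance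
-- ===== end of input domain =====

-- B replaces A's binary heap (heapq) by the two-queue merge technique: sort once, keep originals and
-- new mixes in two front-consumed queues and always take the smaller front; correctness rests on the
-- proved invariant that unconsumed mixes are nondecreasing (alternative algorithm, not claimed faster).


-- ===== PORT A =====
-- heapq modelled observationally (PySem has no heapq): heappush adds the element, heappop
-- removes and returns the minimum, heap[0] is the minimum — exact for every value A observes,
-- by the heap invariant (elements are plain Ints, so equal minima are indistinguishable).
def pvHeapPush (h : List Int) (x : Int) : List Int := h ++ [x]

def pvHeapPop? (h : List Int) : Option (Int × List Int) :=
  match PySem.List.min? h (fun x => x) with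
  | none => none
  | some m => some (m, h.erase m)

-- the while loop; fuel = current heap size bounds the iteration count (each step shrinks the heap by one)
def pvLoopA (k : Int) : Nat → List Int → Int → Int
  | 0, _, count => count
  | fuel+1, heap, count =>
    match PySem.List.min? heap (fun x => x) with    -- heap[0]; none = IndexError on the empty heap
    | none => 0
    | some m0 =>
      if m0 < k then
        match pvHeapPop? heap with
        | none => 0
        | some (a, h1) =>
          match pvHeapPop? h1 with
          | none => 0                               -- second heappop on an empty heap: IndexError (outside Pre_)
          | some (b, h2') =>
            let h2 := pvHeapPush h2' (a + b * 2)    -- heappush(heap, heappop + heappop*2)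
            if h2.length == 1 && decide (h2.headI < k) then -1   -- len(heap)==1 and heap[0]<k
            else pvLoopA k fuel h2 (count + 1)
      else count

def solution (s : List Int) (k : Int) : Int :=
  let heap := s.foldl (fun h i => pvHeapPush h i) []   -- for i in s: heappush(heap, i)
  pvLoopA k heap.length heap 0

-- ===== PORT B =====
-- Source B's advancing front indices i, j are rendered by consuming the two queues from the front
-- (orig = orig[i:], mixed = mixed[j:]): same values read, same order, same IndexError spots (none).
-- _pop(orig, mixed, i, j): smaller front wins, ties go to orig; none = IndexError (both empty)
def pvPop? (orig mixed : List Int) : Option (Int × List Int × List Int) :=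
  match orig, mixed with
  | [], [] => none
  | o :: os, [] => some (o, os, [])
  | [], m :: ms => some (m, [], ms)
  | o :: os, m :: ms => if o ≤ m then some (o, os, m :: ms) else some (m, o :: os, ms)

-- cur = orig[i] if that front is smaller else mixed[j]; none = IndexError (both empty)
def pvCur? (orig mixed : List Int) : Option Int :=
  match orig, mixed with
  | [], [] => none
  | o :: _, [] => some o
  | [], m :: _ => some m
  | o :: _, m :: _ => if o ≤ m then some o else some m

-- the while True loop of Source B; fuel = total queue size bounds the iteration count
def pvLoopB (k : Int) : Nat → List Int → List Int → Int → Int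
  | 0, _, _, count => count
  | fuel+1, orig, mixed, count =>
    match pvCur? orig mixed with
    | none => 0
    | some cur =>
      if k ≤ cur then count                          -- if cur >= k: return count
      else
        match pvPop? orig mixed with
        | none => 0
        | some (a, o1, m1) =>
          match pvPop? o1 m1 with
          | none => 0                                -- second pop with both queues empty: IndexError (outside Pre_)
          | some (b, o2, m2) =>
            let m := a + b * 2
            if (o2.length + (m2.length + 1) == 1) && decide (m < k) then -1  -- (len(orig)-i)+(len(mixed)-j)==1 and m<k
            else pvLoopB k fuel o2 (m2 ++ [m]) (count + 1)

def solution_alt (s : List Int) (k : Int) : Int :=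
  let orig := PySem.List.sorted s (fun x => x) false   -- orig = sorted(s)
  pvLoopB k orig.length orig [] 0

-- ===== PRECONDITION & SPEC =====
-- Pre_ excludes exactly the inputs where Python A raises IndexError: the empty list (heap[0]) and a
-- single-element list below k (the second heappop pops an empty heap). B raises at the same inputs.
def Pre_solution (s : List Int) (k : Int) : Prop := s ≠ [] ∧ (s.length = 1 → k ≤ s.headI)
instance (s : List Int) (k : Int) : Decidable (Pre_solution s k) := by unfold Pre_solution; infer_instance

def pvWitness_solution : List Int × Int := ([1, 2], 3)

def Spec_solution (s : List Int) (k : Int) (out : Int) : Prop := out = solution_alt s k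
instance (s : List Int) (k : Int) (out : Int) : Decidable (Spec_solution s k out) := by unfold Spec_solution; infer_instance

-- ===== CLAIM (what is proved, stated in full; the proofs are below) =====
def Claim_equal_solution : Prop := ∀ (s : List Int) (k : Int), Dom_solution s k → Pre_solution s k → Spec_solution s k (solution s k)

-- ===== LEMMAS AND PROOFS =====

lemma pv_build_eq (s : List Int) : s.foldl (fun h i => pvHeapPush h i) [] = s := by
  have h : ∀ (acc : List Int), s.foldl (fun h i => pvHeapPush h i) acc = acc ++ s := by
    induction s with
    | nil => simp
    | cons x t ih =>
        intro acc
        rw [List.foldl_cons]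
        show List.foldl _ (acc ++ [x]) t = acc ++ x :: t
        rw [ih]
        simp
  simpa using h []

-- the key invariant of the mixed queue: every unconsumed mix is ≤ 3t for a floor t of everything
-- that is not an old mix; it forces the next mix a+2b to land at the back in sorted position
def pvInvB (orig mixed : List Int) : Prop :=
  mixed = [] ∨ ∃ t : Int, (∀ x ∈ orig, t ≤ x) ∧ (∀ y ∈ mixed.dropLast, t ≤ y) ∧ (∀ y ∈ mixed, y ≤ 3 * t)

lemma pv_pop_spec {X Y : List Int} {v : Int} {X' Y' : List Int}
    (hX : X.Pairwise (· ≤ ·)) (hY : Y.Pairwise (· ≤ ·))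
    (h : pvPop? X Y = some (v, X', Y')) :
    ((X = v :: X' ∧ Y' = Y) ∨ (Y = v :: Y' ∧ X' = X ∧ ∀ x ∈ X, v < x)) ∧
      (∀ x ∈ X' ++ Y', v ≤ x) := by
  match X, Y with
  | [], [] => simp [pvPop?] at h
  | o :: os, [] =>
      simp only [pvPop?, Option.some.injEq, Prod.mk.injEq] at h
      obtain ⟨rfl, rfl, rfl⟩ := h
      exact ⟨Or.inl ⟨rfl, rfl⟩, by simpa using (List.pairwise_cons.mp hX).1⟩
  | [], m :: ms =>
      simp only [pvPop?, Option.some.injEq, Prod.mk.injEq] at h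
      obtain ⟨rfl, rfl, rfl⟩ := h
      exact ⟨Or.inr ⟨rfl, rfl, by simp⟩, by simpa using (List.pairwise_cons.mp hY).1⟩
  | o :: os, m :: ms =>
      simp only [pvPop?] at h
      by_cases hom : o ≤ m
      · rw [if_pos hom] at h
        obtain ⟨rfl, rfl, rfl⟩ : o = v ∧ os = X' ∧ (m :: ms) = Y' := by
          simpa [Prod.ext_iff] using h
        refine ⟨Or.inl ⟨rfl, rfl⟩, ?_⟩
        intro x hx
        rcases List.mem_append.mp hx with hx | hx
        · exact (List.pairwise_cons.mp hX).1 x hx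
        · rcases List.mem_cons.mp hx with rfl | hx
          · exact hom
          · exact le_trans hom ((List.pairwise_cons.mp hY).1 x hx)
      · rw [if_neg hom] at h
        obtain ⟨rfl, rfl, rfl⟩ : m = v ∧ (o :: os) = X' ∧ ms = Y' := by
          simpa [Prod.ext_iff] using h
        rw [not_le] at hom
        refine ⟨Or.inr ⟨rfl, rfl, ?_⟩, ?_⟩
        · intro x hx
          rcases List.mem_cons.mp hx with rfl | hx
          · exact hom
          · exact lt_of_lt_of_le hom ((List.pairwise_cons.mp hX).1 x hx)
        · intro x hx
          rcases List.mem_append.mp hx with hx | hx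
          · rcases List.mem_cons.mp hx with rfl | hx
            · exact le_of_lt hom
            · exact le_of_lt (lt_of_lt_of_le hom ((List.pairwise_cons.mp hX).1 x hx))
          · exact (List.pairwise_cons.mp hY).1 x hx

lemma pv_pop_none {X Y : List Int} (h : pvPop? X Y = none) : X = [] ∧ Y = [] := by
  match X, Y with
  | [], [] => exact ⟨rfl, rfl⟩
  | o :: os, [] => simp [pvPop?] at h
  | [], m :: ms => simp [pvPop?] at h
  | o :: os, m :: ms => simp only [pvPop?] at h; split at h <;> simp at h

lemma pv_cur_eq_pop (X Y : List Int) : pvCur? X Y = (pvPop? X Y).map Prod.fst := by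
  match X, Y with
  | [], [] => rfl
  | o :: os, [] => rfl
  | [], m :: ms => rfl
  | o :: os, m :: ms =>
      simp only [pvCur?, pvPop?]
      by_cases hom : o ≤ m <;> simp [hom]

lemma pv_shape_mem {X Y : List Int} {v : Int} {X' Y' : List Int}
    (hsh : (X = v :: X' ∧ Y' = Y) ∨ (Y = v :: Y' ∧ X' = X ∧ ∀ x ∈ X, v < x)) :
    v ∈ X ++ Y := by
  rcases hsh with ⟨rfl, rfl⟩ | ⟨rfl, rfl, _⟩ <;> simp

lemma pv_shape_erase {X Y : List Int} {v : Int} {X' Y' : List Int}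
    (hsh : (X = v :: X' ∧ Y' = Y) ∨ (Y = v :: Y' ∧ X' = X ∧ ∀ x ∈ X, v < x)) :
    (X ++ Y).erase v = X' ++ Y' := by
  rcases hsh with ⟨rfl, rfl⟩ | ⟨rfl, rfl, hlt⟩
  · rw [List.cons_append, List.erase_cons_head]
  · rw [List.erase_append_right _ (fun hm => lt_irrefl v (hlt v hm)), List.erase_cons_head]

lemma pv_shape_pairwise {X Y : List Int} {v : Int} {X' Y' : List Int}
    (hX : X.Pairwise (· ≤ ·)) (hY : Y.Pairwise (· ≤ ·))
    (hsh : (X = v :: X' ∧ Y' = Y) ∨ (Y = v :: Y' ∧ X' = X ∧ ∀ x ∈ X, v < x)) :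
    X'.Pairwise (· ≤ ·) ∧ Y'.Pairwise (· ≤ ·) := by
  rcases hsh with ⟨rfl, rfl⟩ | ⟨rfl, rfl, _⟩
  · exact ⟨(List.pairwise_cons.mp hX).2, hY⟩
  · exact ⟨hX, (List.pairwise_cons.mp hY).2⟩

lemma pv_shape_length {X Y : List Int} {v : Int} {X' Y' : List Int}
    (hsh : (X = v :: X' ∧ Y' = Y) ∨ (Y = v :: Y' ∧ X' = X ∧ ∀ x ∈ X, v < x)) :
    X.length + Y.length = X'.length + Y'.length + 1 := by
  rcases hsh with ⟨rfl, rfl⟩ | ⟨rfl, rfl, _⟩ <;> simp <;> omega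

lemma pv_min_eq {heap l : List Int} {c : Int} (hp : heap.Perm l) (hc : c ∈ l)
    (hmin : ∀ x ∈ l, c ≤ x) : PySem.List.min? heap (fun x => x) = some c := by
  cases hmv : PySem.List.min? heap (fun x => x) with
  | none =>
      rw [PySem.List.min?_eq_none_iff] at hmv
      subst hmv
      have : l = [] := List.perm_nil.mp hp.symm
      subst this
      exact absurd hc (List.not_mem_nil)
  | some m =>
      have hm_mem : m ∈ heap := PySem.List.min?_mem hmv
      have h1 : c ≤ m := hmin m (hp.mem_iff.mp hm_mem)
      have h2 : m ≤ c := PySem.List.min?_isMin hmv c (hp.mem_iff.mpr hc)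
      rw [le_antisymm h2 h1]

-- one merge step preserves sortedness of the mixed queue and the invariant
lemma pv_step_inv {orig mixed o1 m1 o2 m2 : List Int} {a b : Int}
    (hInv : pvInvB orig mixed)
    (hsh1 : (orig = a :: o1 ∧ m1 = mixed) ∨ (mixed = a :: m1 ∧ o1 = orig ∧ ∀ x ∈ orig, a < x))
    (hmin2 : ∀ x ∈ o2 ++ m2, b ≤ x)
    (hsh2 : (o1 = b :: o2 ∧ m2 = m1) ∨ (m1 = b :: m2 ∧ o2 = o1 ∧ ∀ x ∈ o1, b < x))
    (hab : a ≤ b) :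
    (∀ y ∈ m2, y ≤ a + b * 2) ∧ pvInvB o2 (m2 ++ [a + b * 2]) := by
  by_cases hm2 : m2 = []
  · subst hm2
    refine ⟨by simp, Or.inr ⟨b, ?_, by simp, ?_⟩⟩
    · intro x hx; exact hmin2 x (List.mem_append.mpr (Or.inl hx))
    · intro y hy
      have : y = a + b * 2 := by simpa using hy
      omega
  · -- m2 ≠ []: every y ∈ m2 is an old mix, bounded by 3t with t ≤ a
    have hm2m1 : ∀ y ∈ m2, y ∈ m1 := by
      intro y hy
      rcases hsh2 with ⟨_, rfl⟩ | ⟨h, _, _⟩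
      · exact hy
      · rw [h]; exact List.mem_cons_of_mem _ hy
    have hm2mixed : ∀ y ∈ m2, y ∈ mixed := by
      intro y hy
      rcases hsh1 with ⟨_, rfl⟩ | ⟨h, _, _⟩
      · exact hm2m1 y hy
      · rw [h]; exact List.mem_cons_of_mem _ (hm2m1 y hy)
    obtain ⟨z, hz⟩ := List.exists_mem_of_ne_nil m2 hm2
    have hmixed_ne : mixed ≠ [] := List.ne_nil_of_mem (hm2mixed z hz)
    rcases hInv with h | ⟨t, htO, htD, htU⟩
    · exact absurd h hmixed_ne
    have hta : t ≤ a := by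
      by_contra hta
      rw [not_le] at hta
      rcases hsh1 with ⟨h1, _⟩ | ⟨h1, _, _⟩
      · exact absurd (htO a (by rw [h1]; exact List.mem_cons_self)) (by omega)
      · -- a is the head of mixed and a < t: the rest of mixed must be empty
        cases hm1 : m1 with
        | nil =>
            rcases hsh2 with ⟨_, h2⟩ | ⟨h2, _, _⟩
            · exact hm2 (by rw [h2, hm1])
            · rw [hm1] at h2; simp at h2
        | cons c cs =>
            have : a ∈ mixed.dropLast := by
              rw [h1, hm1]
              simp [List.dropLast]
            exact absurd (htD a this) (by omega)
    refine ⟨?_, Or.inr ⟨b, ?_, ?_, ?_⟩⟩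
    · intro y hy
      have := htU y (hm2mixed y hy)
      omega
    · intro x hx; exact hmin2 x (List.mem_append.mpr (Or.inl hx))
    · rw [List.dropLast_concat]
      intro y hy; exact hmin2 y (List.mem_append.mpr (Or.inr hy))
    · intro y hy
      rcases List.mem_append.mp hy with hy | hy
      · have := htU y (hm2mixed y hy)
        omega
      · have : y = a + b * 2 := by simpa using hy
        omega

lemma pv_loop_eq (k : Int) : ∀ (fuel : Nat) (heap orig mixed : List Int) (count : Int),
    heap.Perm (orig ++ mixed) → orig.Pairwise (· ≤ ·) → mixed.Pairwise (· ≤ ·) →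
    pvInvB orig mixed → heap.length ≤ fuel →
    pvLoopA k fuel heap count = pvLoopB k fuel orig mixed count := by
  intro fuel
  induction fuel with
  | zero => intro heap orig mixed count _ _ _ _ _; rfl
  | succ fuel ih =>
    intro heap orig mixed count hp hO hM hInv hfuel
    cases hpop1 : pvPop? orig mixed with
    | none =>
        obtain ⟨rfl, rfl⟩ := pv_pop_none hpop1
        have : heap = [] := List.perm_nil.mp (by simpa using hp)
        subst this
        have hm : PySem.List.min? ([] : List Int) (fun x => x) = none :=
          (PySem.List.min?_eq_none_iff _ _).mpr rfl
        simp [pvLoopA, pvLoopB, pvCur?, hm]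
    | some res =>
      obtain ⟨a, o1, m1⟩ := res
      obtain ⟨hsh1, hmin1⟩ := pv_pop_spec hO hM hpop1
      have hcur : pvCur? orig mixed = some a := by
        rw [pv_cur_eq_pop, hpop1]; rfl
      have hamem : a ∈ orig ++ mixed := pv_shape_mem hsh1
      have haall : ∀ x ∈ orig ++ mixed, a ≤ x := by
        intro x hx
        by_cases hxa : x = a
        · omega
        · have hx' : x ∈ o1 ++ m1 := by
            have := pv_shape_erase hsh1
            have hxe : x ∈ (orig ++ mixed).erase a := (List.mem_erase_of_ne hxa).mpr hx
            rwa [this] at hxe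
          exact hmin1 x hx'
      have hminA : PySem.List.min? heap (fun x => x) = some a := pv_min_eq hp hamem haall
      by_cases hak : a < k
      · -- merge branch
        have hpopA1 : pvHeapPop? heap = some (a, heap.erase a) := by simp [pvHeapPop?, hminA]
        have hp1 : (heap.erase a).Perm (o1 ++ m1) := by
          have := hp.erase a
          rwa [pv_shape_erase hsh1] at this
        obtain ⟨hO1, hM1⟩ := pv_shape_pairwise hO hM hsh1
        cases hpop2 : pvPop? o1 m1 with
        | none =>
            obtain ⟨rfl, rfl⟩ := pv_pop_none hpop2
            have h1nil : heap.erase a = [] := List.perm_nil.mp (by simpa using hp1)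
            have hminN : PySem.List.min? (heap.erase a) (fun x => x) = none := by
              rw [h1nil]; exact (PySem.List.min?_eq_none_iff _ _).mpr rfl
            have hpopA2 : pvHeapPop? (heap.erase a) = none := by simp [pvHeapPop?, hminN]
            simp only [pvLoopA, pvLoopB, hminA, hcur, hpopA1, hpopA2, hpop1, hpop2,
              if_pos hak, if_neg (not_le.mpr hak)]
        | some res2 =>
          obtain ⟨b, o2, m2⟩ := res2
          obtain ⟨hsh2, hmin2⟩ := pv_pop_spec hO1 hM1 hpop2
          have hbmem : b ∈ o1 ++ m1 := pv_shape_mem hsh2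
          have hball : ∀ x ∈ o1 ++ m1, b ≤ x := by
            intro x hx
            by_cases hxb : x = b
            · omega
            · have hx' : x ∈ o2 ++ m2 := by
                have := pv_shape_erase hsh2
                have hxe : x ∈ (o1 ++ m1).erase b := (List.mem_erase_of_ne hxb).mpr hx
                rwa [this] at hxe
              exact hmin2 x hx'
          have hminB : PySem.List.min? (heap.erase a) (fun x => x) = some b :=
            pv_min_eq hp1 hbmem hball
          have hpopA2 : pvHeapPop? (heap.erase a) = some (b, (heap.erase a).erase b) := by
            simp [pvHeapPop?, hminB]
          have hab : a ≤ b := hmin1 b hbmem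
          have hp2 : ((heap.erase a).erase b).Perm (o2 ++ m2) := by
            have := hp1.erase b
            rwa [pv_shape_erase hsh2] at this
          obtain ⟨hO2, hM2⟩ := pv_shape_pairwise hO1 hM1 hsh2
          obtain ⟨hle, hInv'⟩ := pv_step_inv hInv hsh1 hmin2 hsh2 hab
          have hlen2 : ((heap.erase a).erase b).length = o2.length + m2.length := hp2.length_eq.trans (by simp)
          have hlenheap : heap.length = o2.length + m2.length + 2 := by
            have e1 : heap.length = orig.length + mixed.length := hp.length_eq.trans (by simp)
            have e2 := pv_shape_length hsh1
            have e3 := pv_shape_length hsh2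
            omega
          have hA : pvLoopA k (fuel+1) heap count =
              (if ((((heap.erase a).erase b) ++ [a + b * 2]).length == 1 &&
                    decide ((((heap.erase a).erase b) ++ [a + b * 2]).headI < k)) = true then -1
               else pvLoopA k fuel (((heap.erase a).erase b) ++ [a + b * 2]) (count + 1)) := by
            simp only [pvLoopA, hminA, hpopA1, hpopA2, pvHeapPush, if_pos hak]
            rfl
          have hB : pvLoopB k (fuel+1) orig mixed count =
              (if ((o2.length + (m2.length + 1) == 1) && decide (a + b * 2 < k)) = true then -1
               else pvLoopB k fuel o2 (m2 ++ [a + b * 2]) (count + 1)) := by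
            simp only [pvLoopB, hcur, hpop1, hpop2, if_neg (not_le.mpr hak)]
          rw [hA, hB]
          by_cases hone : o2.length + m2.length = 0
          · have ho2e : o2 = [] := List.length_eq_zero_iff.mp (by omega)
            have hm2e : m2 = [] := List.length_eq_zero_iff.mp (by omega)
            have hz : (heap.erase a).erase b = [] := List.length_eq_zero_iff.mp (by omega)
            rw [hz, ho2e, hm2e]
            simp only [List.nil_append, List.length_nil, List.length_cons, List.headI]
            by_cases hmk : a + b * 2 < k
            · rw [if_pos (by simp [hmk]), if_pos (by simp [hmk])]
            · rw [if_neg (by simp [hmk]), if_neg (by simp [hmk])]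
              refine ih [a + b * 2] [] [a + b * 2] (count + 1) (by simp) (by simp) (by simp) ?_ (by simp; omega)
              refine Or.inr ⟨b, by simp, by simp, ?_⟩
              intro y hy
              have hy' : y = a + b * 2 := by simpa using hy
              omega
          · have hlenA : ((heap.erase a).erase b ++ [a + b * 2]).length = o2.length + m2.length + 1 := by
              rw [List.length_append, hlen2]
              simp
            have hlA : (((heap.erase a).erase b ++ [a + b * 2]).length == 1) = false := by
              rw [hlenA]
              simp only [beq_eq_false_iff_ne, ne_eq]
              omega
            have hlB : (o2.length + (m2.length + 1) == 1) = false := by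
              simp
              omega
            rw [if_neg (by rw [hlA]; simp), if_neg (by rw [hlB]; simp)]
            refine ih _ _ _ _ ?_ hO2 ?_ hInv' ?_
            · exact (hp2.append_right [a + b * 2]).trans (by rw [List.append_assoc])
            · refine List.pairwise_append.mpr ⟨hM2, by simp, ?_⟩
              intro y hy z hz
              have hz' : z = a + b * 2 := by simpa using hz
              rw [hz']
              exact hle y hy
            · rw [hlenA]
              omega
      · -- both return count
        simp only [pvLoopA, pvLoopB, hminA, hcur, if_neg hak, if_pos (not_lt.mp hak)]

-- ===== VERDICT (by name: the statement is the Claim_ definition above) =====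
theorem solution_spec : Claim_equal_solution := by
  intro s k _ _
  unfold Spec_solution solution solution_alt
  show pvLoopA k (s.foldl (fun h i => pvHeapPush h i) []).length (s.foldl (fun h i => pvHeapPush h i) []) 0 =
    pvLoopB k (PySem.List.sorted s (fun x => x) false).length (PySem.List.sorted s (fun x => x) false) [] 0
  rw [pv_build_eq]
  have hlen : (PySem.List.sorted s (fun x => x) false).length = s.length :=
    (PySem.List.sorted_perm s (fun x => x) false).length_eq
  rw [hlen]
  exact pv_loop_eq k s.length s (PySem.List.sorted s (fun x => x) false) [] 0
    (by simpa using (PySem.List.sorted_perm s (fun x => x) false).symm)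
    (by simpa using PySem.List.sorted_pairwise s (fun x => x))
    (by simp)
    (Or.inl rfl)
    (le_refl _)
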